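-- pv_equiv track=rewrite | github.com/233748863/BOT-MMORPG-AI-CN | 核心/智能录制.py | _get_max_consecutive_count
-- ===== SOURCE A (Python) =====
-- from typing import List, Dict, Any, Optional, Tuple
--
-- def _get_max_consecutive_count(items: List[Any], target: Any) -> int:
--     """获取列表中目标元素的最大连续出现次数
--
--     Args:
--         items: 元素列表
--         target: 目标元素
--
--     Returns:
--         最大连续出现次数
--     """
--     if not items:
--         return 0
--
--     max_count = 0
--     current_count = 0
--
--     for item in items:
--         if item == target:
--             current_count += 1
--             max_count = max(max_count, current_count)
--         else:
--             current_count = 0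
--
--     return max_count
-- ===== SOURCE B (Python) =====
-- from typing import List, Any
--
-- def _get_max_consecutive_count(items: List[Any], target: Any) -> int:
--     """Max consecutive occurrences of target: skip whole runs with two pointers."""
--     best = 0
--     i = 0
--     n = len(items)
--     while i < n:
--         if items[i] == target:
--             j = i
--             while j < n and items[j] == target:
--                 j += 1
--             if j - i > best:
--                 best = j - i
--             i = j
--         else:
--             i += 1
--     return best
-- ===== Notes on version B (the rewrite author's own statement) =====
-- stated objective: alternative
-- what changed: Replaces the running-counter/max single pass with a two-pointer run-skipping scan that measures each maximal run of target in one inner sweep and keeps the best length.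
import Mathlib
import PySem

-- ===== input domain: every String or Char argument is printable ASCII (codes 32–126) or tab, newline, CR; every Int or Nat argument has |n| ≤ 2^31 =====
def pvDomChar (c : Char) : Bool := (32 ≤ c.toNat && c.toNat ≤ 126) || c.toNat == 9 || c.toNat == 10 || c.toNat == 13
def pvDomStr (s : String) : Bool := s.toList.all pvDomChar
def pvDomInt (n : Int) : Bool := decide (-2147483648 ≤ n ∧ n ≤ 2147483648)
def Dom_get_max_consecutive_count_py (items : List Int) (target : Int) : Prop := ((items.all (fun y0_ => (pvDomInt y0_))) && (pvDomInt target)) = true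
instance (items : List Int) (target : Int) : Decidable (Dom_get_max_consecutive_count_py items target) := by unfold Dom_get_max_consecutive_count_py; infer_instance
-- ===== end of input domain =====

-- B replaces A's running-counter pass with a two-pointer run-skipping scan (alternative decomposition, same cost).

-- ===== PORT A =====
-- literal port of A's loop: state (max_count, current_count), early return 0 on empty list
def get_max_consecutive_count_py (items : List Int) (target : Int) : Int :=
  match items with
  | [] => 0
  | _ :: _ =>
    (items.foldl (fun (s : Int × Int) item =>
      if item = target then (max s.1 (s.2 + 1), s.2 + 1) else (s.1, 0)) (0, 0)).1

-- ===== PORT B =====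
-- port of B's outer while: at a target element measure the whole run (inner while = takeWhile),
-- jump past it (dropWhile), otherwise advance by one; keep the best run length
def pvAltAux (t : Int) : List Int → Int
  | [] => 0
  | x :: xs =>
    if x = t then
      max (((x :: xs).takeWhile (fun y => y == t)).length : Int)
          (pvAltAux t ((x :: xs).dropWhile (fun y => y == t)))
    else pvAltAux t xs
termination_by l => l.length
decreasing_by
  · simp only [List.dropWhile_cons]
    have hx : (fun y => y == t) x = true := by simpa using ‹x = t›
    rw [if_pos hx]
    exact Nat.lt_succ_of_le (List.Sublist.length_le (List.dropWhile_sublist _))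
  · simp

def get_max_consecutive_count_py_alt (items : List Int) (target : Int) : Int :=
  pvAltAux target items

-- ===== PRECONDITION & SPEC =====
def Spec_get_max_consecutive_count_py (items : List Int) (target : Int) (out : Int) : Prop := out = get_max_consecutive_count_py_alt items target
instance (items : List Int) (target : Int) (out : Int) : Decidable (Spec_get_max_consecutive_count_py items target out) := by unfold Spec_get_max_consecutive_count_py; infer_instance

-- ===== CLAIM (what is proved, stated in full; the proofs are below) =====
def Claim_equal_get_max_consecutive_count_py : Prop := ∀ (items : List Int) (target : Int), Dom_get_max_consecutive_count_py items target → Spec_get_max_consecutive_count_py items target (get_max_consecutive_count_py items target)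

-- ===== LEMMAS AND PROOFS =====

-- reference function: best run length achievable from here on, entering with a current streak c
def pvMaxRun (t : Int) (c : Int) : List Int → Int
  | [] => 0
  | x :: xs => if x = t then max (c + 1) (pvMaxRun t (c + 1) xs) else pvMaxRun t 0 xs

theorem pvMaxRun_nonneg (t : Int) (l : List Int) : ∀ c : Int, 0 ≤ c → 0 ≤ pvMaxRun t c l := by
  induction l with
  | nil => intro c _; simp [pvMaxRun]
  | cons x xs ih =>
    intro c hc
    by_cases h : x = t
    · simp only [pvMaxRun, if_pos h]
      exact le_trans (by omega) (le_max_left _ _)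
    · simpa [pvMaxRun, h] using ih 0 le_rfl

-- A's fold computes max m (pvMaxRun t c l) given the invariant 0 ≤ c ≤ m
theorem pvFold_eq (t : Int) (l : List Int) : ∀ m c : Int, 0 ≤ c → c ≤ m →
    (l.foldl (fun (s : Int × Int) item =>
      if item = t then (max s.1 (s.2 + 1), s.2 + 1) else (s.1, 0)) (m, c)).1
    = max m (pvMaxRun t c l) := by
  induction l with
  | nil => intro m c hc hcm; simp [pvMaxRun]; omega
  | cons x xs ih =>
    intro m c hc hcm
    by_cases h : x = t
    · simp only [List.foldl_cons, if_pos h, pvMaxRun]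
      rw [ih (max m (c + 1)) (c + 1) (by omega) (le_max_right _ _)]
      rw [max_assoc]
    · simp only [List.foldl_cons, pvMaxRun]
      rw [if_neg h, if_neg h]
      exact ih m 0 le_rfl (by omega)

-- pvMaxRun with streak c equals: the (extended) leading run vs the rest after it
theorem pvMaxRun_split (t : Int) (l : List Int) : ∀ c : Int, 0 ≤ c →
    max c (pvMaxRun t c l)
      = max (c + ((l.takeWhile (fun y => y == t)).length : Int))
            (pvMaxRun t 0 (l.dropWhile (fun y => y == t))) := by
  induction l with
  | nil => intro c hc; simp [pvMaxRun]
  | cons x xs ih =>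
    intro c hc
    by_cases h : x = t
    · have hx : (fun y => y == t) x = true := by simpa using h
      simp only [pvMaxRun, if_pos h, List.takeWhile_cons, List.dropWhile_cons, hx, if_pos]
      rw [← max_assoc, max_eq_right (by omega : c ≤ c + 1)]
      rw [ih (c + 1) (by omega)]
      simp only [List.length_cons]
      congr 1
      push_cast
      ring_nf
    · have hx : (fun y => y == t) x = false := by simpa using h
      simp only [List.takeWhile_cons, List.dropWhile_cons, hx, Bool.false_eq_true, if_false,
        List.length_nil, Int.natCast_zero, add_zero]
      simp only [pvMaxRun, if_neg h]

theorem pvAltAux_eq (t : Int) : ∀ l : List Int, pvAltAux t l = pvMaxRun t 0 l := by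
  intro l
  induction l using pvAltAux.induct t with
  | case1 => simp [pvAltAux, pvMaxRun]
  | case2 xs ih =>
    rw [pvAltAux, if_pos rfl, ih]
    have := pvMaxRun_split t (t :: xs) 0 le_rfl
    rw [max_eq_right (pvMaxRun_nonneg t (t :: xs) 0 le_rfl), zero_add] at this
    exact this.symm
  | case3 x xs h ih =>
    rw [pvAltAux, if_neg h, ih]
    simp [pvMaxRun, h]

-- ===== VERDICT (by name: the statement is the Claim_ definition above) =====
theorem get_max_consecutive_count_py_spec : Claim_equal_get_max_consecutive_count_py := by
  intro items target _
  unfold Spec_get_max_consecutive_count_py get_max_consecutive_count_py get_max_consecutive_count_py_alt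
  rw [pvAltAux_eq]
  cases items with
  | nil => simp [pvMaxRun]
  | cons x xs =>
    rw [pvFold_eq target (x :: xs) 0 0 le_rfl le_rfl]
    exact max_eq_right (pvMaxRun_nonneg target (x :: xs) 0 le_rfl)
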